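-- pv_equiv track=rewrite | github.com/FBS93/embedded_c_framework | sw/ecf/tools/eff_gen/eff_gen.py | strip_preprocessor_directives
-- ===== SOURCE A (Python) =====
-- def strip_preprocessor_directives(source_text):
--   filtered_lines = []
--   skip_continuation = False
--
--   for line in source_text.splitlines():
--     stripped_line = line.lstrip()
--
--     if skip_continuation:
--       if not line.rstrip().endswith('\\'):
--         skip_continuation = False
--       continue
--
--     if stripped_line.startswith('#'):
--       if line.rstrip().endswith('\\'):
--         skip_continuation = True
--       continue
--
--     filtered_lines.append(line)
--
--   return '\n'.join(filtered_lines)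
-- ===== SOURCE B (Python) =====
-- def strip_preprocessor_directives(source_text):
--   lines = source_text.splitlines()
--   kept = []
--   i = 0
--   n = len(lines)
--   while i < n:
--     line = lines[i]
--     if line.lstrip().startswith('#'):
--       # consume the whole directive: skip continuation lines, then the terminating line
--       while i < n and lines[i].rstrip().endswith('\\'):
--         i += 1
--       i += 1
--     else:
--       kept.append(line)
--       i += 1
--   return '\n'.join(kept)
-- ===== Notes on version B (the rewrite author's own statement) =====
-- stated objective: alternative
-- what changed: Replaces the boolean skip_continuation flag threaded through a single for-loop by an explicit-index walk that, on seeing a directive, consumes the entire multi-line directive with an inner while over continuation lines.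
import Mathlib
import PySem

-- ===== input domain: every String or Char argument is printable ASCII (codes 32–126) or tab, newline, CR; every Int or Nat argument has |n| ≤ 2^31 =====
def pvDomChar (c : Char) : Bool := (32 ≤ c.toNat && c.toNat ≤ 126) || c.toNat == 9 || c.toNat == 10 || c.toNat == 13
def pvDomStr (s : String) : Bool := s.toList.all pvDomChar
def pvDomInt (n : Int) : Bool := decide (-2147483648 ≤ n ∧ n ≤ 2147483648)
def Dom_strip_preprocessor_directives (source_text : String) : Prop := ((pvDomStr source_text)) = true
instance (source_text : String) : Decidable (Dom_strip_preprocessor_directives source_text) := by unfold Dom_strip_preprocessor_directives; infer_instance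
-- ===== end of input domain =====

-- B replaces A's skip_continuation flag by an explicit-index walk that consumes a whole
-- multi-line directive with an inner loop (objective: alternative decomposition, same cost).

-- ===== PORT A =====
-- one loop step of A: state = (filtered_lines, skip_continuation)
def pvStepA (st : List String × Bool) (line : String) : List String × Bool :=
  if st.2 then
    (st.1, if !(PySem.Str.endswith (PySem.Str.rstrip line) "\\") then false else st.2)
  else if PySem.Str.startswith (PySem.Str.lstrip line) "#" then
    (st.1, if PySem.Str.endswith (PySem.Str.rstrip line) "\\" then true else st.2)
  else
    (st.1 ++ [line], st.2)

def strip_preprocessor_directives (source_text : String) : String :=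
  PySem.Str.join "\n" ((PySem.Str.splitlines source_text).foldl pvStepA ([], false)).1

-- ===== PORT B =====
-- B's inner while loop: advance past continuation lines, then drop one more line (no-op at EOF)
def pvConsume : List String → List String
  | [] => []
  | l :: rest => if PySem.Str.endswith (PySem.Str.rstrip l) "\\" then pvConsume rest else rest

theorem pvConsume_len_le : ∀ (ls : List String), (pvConsume ls).length ≤ ls.length
  | [] => Nat.le_refl _
  | l :: rest => by
    simp only [pvConsume]
    split
    · exact Nat.le_succ_of_le (pvConsume_len_le rest)
    · exact Nat.le_succ _

-- B's outer while loop over the line list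
def pvWalkB : List String → List String
  | [] => []
  | line :: rest =>
    if PySem.Str.startswith (PySem.Str.lstrip line) "#" then
      pvWalkB (pvConsume (line :: rest))
    else
      line :: pvWalkB rest
termination_by ls => ls.length
decreasing_by
  · simp only [pvConsume]
    split
    · exact Nat.lt_succ_of_le (pvConsume_len_le rest)
    · exact Nat.lt_succ_self _
  · exact Nat.lt_succ_self _

def strip_preprocessor_directives_alt (source_text : String) : String :=
  PySem.Str.join "\n" (pvWalkB (PySem.Str.splitlines source_text))

-- ===== PRECONDITION & SPEC =====
def Spec_strip_preprocessor_directives (source_text : String) (out : String) : Prop := out = strip_preprocessor_directives_alt source_text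
instance (source_text : String) (out : String) : Decidable (Spec_strip_preprocessor_directives source_text out) := by unfold Spec_strip_preprocessor_directives; infer_instance

-- ===== CLAIM (what is proved, stated in full; the proofs are below) =====
def Claim_equal_strip_preprocessor_directives : Prop := ∀ (source_text : String), Dom_strip_preprocessor_directives source_text → Spec_strip_preprocessor_directives source_text (strip_preprocessor_directives source_text)

-- ===== LEMMAS AND PROOFS =====

-- A's fold in skip mode produces the same filtered lines as A's fold in normal mode on the consumed tail
theorem pvFold_skip : ∀ (ls : List String) (acc : List String),
    (ls.foldl pvStepA (acc, true)).1 = ((pvConsume ls).foldl pvStepA (acc, false)).1 := by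
  intro ls
  induction ls with
  | nil => intro acc; simp [pvConsume]
  | cons l rest ih =>
    intro acc
    by_cases h : PySem.Str.endswith (PySem.Str.rstrip l) "\\"
    · simp only [List.foldl, pvStepA, if_true, h, Bool.not_true, Bool.false_eq_true, if_false,
        pvConsume]
      simpa using ih acc
    · have h' : PySem.Chars.endswith (PySem.Chars.rstrip l.toList) ['\\'] = false := by
        simpa using h
      simp [List.foldl, pvStepA, pvConsume, h']

-- main invariant: A's fold from normal mode produces acc ++ B's walk
theorem pvFold_main_aux : ∀ (n : Nat) (ls : List String), ls.length ≤ n → ∀ (acc : List String),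
    (ls.foldl pvStepA (acc, false)).1 = acc ++ pvWalkB ls := by
  intro n
  induction n with
  | zero =>
    intro ls h acc
    have : ls = [] := List.eq_nil_of_length_eq_zero (Nat.le_zero.mp h)
    subst this; simp [pvWalkB]
  | succ n ih =>
    intro ls h acc
    match ls with
    | [] => simp [pvWalkB]
    | line :: rest =>
      have hr : rest.length ≤ n := Nat.lt_succ_iff.mp (by simpa using h)
      by_cases hd0 : PySem.Str.startswith (PySem.Str.lstrip line) "#"
      · have hd : PySem.Chars.startswith (PySem.Chars.lstrip line.toList) ['#'] = true := by
          simpa using hd0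
        by_cases hc0 : PySem.Str.endswith (PySem.Str.rstrip line) "\\"
        · have hc : PySem.Chars.endswith (PySem.Chars.rstrip line.toList) ['\\'] = true := by
            simpa using hc0
          have hcr : (pvConsume rest).length ≤ n := le_trans (pvConsume_len_le rest) hr
          have hstep : (List.foldl pvStepA (acc, false) (line :: rest)).1
              = (List.foldl pvStepA (acc, true) rest).1 := by
            simp [List.foldl, pvStepA, hd, hc]
          rw [hstep, pvFold_skip]
          have hwalk : pvWalkB (line :: rest) = pvWalkB (pvConsume rest) := by
            rw [pvWalkB]
            simp [hd, pvConsume, hc]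
          rw [hwalk]
          exact ih _ hcr acc
        · have hc' : PySem.Chars.endswith (PySem.Chars.rstrip line.toList) ['\\'] = false := by
            simpa using hc0
          have hstep : (List.foldl pvStepA (acc, false) (line :: rest)).1
              = (List.foldl pvStepA (acc, false) rest).1 := by
            simp [List.foldl, pvStepA, hd, hc']
          have hwalk : pvWalkB (line :: rest) = pvWalkB rest := by
            rw [pvWalkB]
            simp [hd, pvConsume, hc']
          rw [hstep, hwalk]
          exact ih _ hr acc
      · have hd' : PySem.Chars.startswith (PySem.Chars.lstrip line.toList) ['#'] = false := by
          simpa using hd0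
        have hstep : (List.foldl pvStepA (acc, false) (line :: rest)).1
            = (List.foldl pvStepA (acc ++ [line], false) rest).1 := by
          simp [List.foldl, pvStepA, hd']
        have hwalk : pvWalkB (line :: rest) = line :: pvWalkB rest := by
          rw [pvWalkB]
          simp [hd']
        rw [hstep, hwalk, ih _ hr]
        simp
theorem pvFold_main (ls : List String) (acc : List String) :
    (ls.foldl pvStepA (acc, false)).1 = acc ++ pvWalkB ls :=
  pvFold_main_aux ls.length ls (Nat.le_refl _) acc

-- ===== VERDICT (by name: the statement is the Claim_ definition above) =====
theorem strip_preprocessor_directives_spec : Claim_equal_strip_preprocessor_directives := by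
  intro s _
  unfold Spec_strip_preprocessor_directives strip_preprocessor_directives strip_preprocessor_directives_alt
  rw [pvFold_main]
  simp
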